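-- pv_equiv track=rewrite | github.com/Diudiuer/code_change_tracer | main.py | find_ancestors
-- ===== SOURCE A (Python) =====
-- def find_ancestors(call_graph, functions):
--     affected = set()
--     visited = set()
--     stack = list(functions)
--
--     while stack:
--         func = stack.pop()
--         if func not in visited:
--             visited.add(func)
--             for caller, callees in call_graph.items():
--                 if func in callees and caller not in affected:
--                     affected.add(caller)
--                     stack.append(caller)
--     return affected
-- ===== SOURCE B (Python) =====
-- def find_ancestors(call_graph, functions):
--     # Build a callee -> callers index once, then do an iterative DFS over that
--     # index using a stack of pending-call frames (no rescanning of the graph).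
--     callers_of = {}
--     for caller, callees in call_graph.items():
--         for callee in dict.fromkeys(callees):
--             callers_of.setdefault(callee, []).append(caller)
--
--     affected = set()
--     visited = set()
--     frames = [list(functions)]
--     while frames:
--         frame = frames[-1]
--         if not frame:
--             frames.pop()
--             continue
--         func = frame.pop()
--         if func in visited:
--             continue
--         visited.add(func)
--         new_callers = [c for c in callers_of.get(func, []) if c not in affected]
--         affected.update(new_callers)
--         frames.append(new_callers)
--     return affected
-- ===== Notes on version B (the rewrite author's own statement) =====
-- stated objective: faster
-- what changed: B precomputes a callee->callers reverse index in one pass and then runs an iterative DFS over a stack of pending-call frames, so each visited function is a single index lookup instead of A's rescan of every (caller, callees) item with a membership test per item.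
import Mathlib
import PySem

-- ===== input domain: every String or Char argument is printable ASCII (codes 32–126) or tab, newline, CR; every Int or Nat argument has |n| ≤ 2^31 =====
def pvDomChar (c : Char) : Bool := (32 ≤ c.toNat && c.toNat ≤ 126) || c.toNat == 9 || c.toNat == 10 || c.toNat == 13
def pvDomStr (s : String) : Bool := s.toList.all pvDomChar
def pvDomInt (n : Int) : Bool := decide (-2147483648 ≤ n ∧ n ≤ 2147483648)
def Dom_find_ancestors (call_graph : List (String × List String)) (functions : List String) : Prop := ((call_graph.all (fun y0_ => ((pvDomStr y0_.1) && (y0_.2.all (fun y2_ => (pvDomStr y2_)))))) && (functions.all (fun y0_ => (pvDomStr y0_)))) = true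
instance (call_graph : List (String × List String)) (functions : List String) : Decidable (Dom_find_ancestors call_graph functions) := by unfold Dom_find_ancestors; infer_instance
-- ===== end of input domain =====

-- ===== PORT A =====
-- B (find_ancestors_alt) builds a callee -> callers index once and walks it with a
-- stack of pending-call frames, instead of A's flat worklist that rescans every
-- call-graph item per popped function (objective: faster).

-- A's inner 'for caller, callees in call_graph.items(): if func in callees and caller not in affected:
-- affected.add(caller); stack.append(caller)'; the stack is kept reversed (head = Python's end).
def pvStepA (items : List (String × List String)) (func : String)
    (st : PySem.Set String × List String) : PySem.Set String × List String :=
  items.foldl (fun st p =>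
    if func ∈ p.2 ∧ ¬ p.1 ∈ st.1 then (PySem.Set.add st.1 p.1, p.1 :: st.2) else st) st

-- A's 'while stack' loop (pop = head of the reversed stack); fuel bounds the number of pops.
def pvLoopA (items : List (String × List String)) :
    Nat → PySem.Set String × PySem.Set String → List String → PySem.Set String × PySem.Set String
  | _, st, [] => st
  | 0, st, _ :: _ => st
  | fuel + 1, (affected, visited), func :: stack =>
      if func ∈ visited then pvLoopA items fuel (affected, visited) stack
      else
        let r := pvStepA items func (affected, stack)
        pvLoopA items fuel (r.1, PySem.Set.add visited func) r.2

def find_ancestors (call_graph : List (String × List String)) (functions : List String) : List String :=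
  (pvLoopA (PySem.Dict.ofList call_graph).items
    (functions.length + (PySem.Dict.ofList call_graph).items.length + 1)
    (PySem.Set.empty, PySem.Set.empty) functions.reverse).1

-- ===== PORT B =====
-- 'for caller, callees in call_graph.items(): for callee in dict.fromkeys(callees):
--  callers_of.setdefault(callee, []).append(caller)'
def pvBuildRev (items : List (String × List String)) : PySem.Dict String (List String) :=
  items.foldl (fun d p =>
    (PySem.List.dedup p.2).foldl (fun d c => d.modify c [] (fun l => l ++ [p.1])) d)
    PySem.Dict.empty

-- B's 'while frames' loop; each frame is kept reversed (head = the element frame.pop()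
-- returns), so the pushed frame is new_callers.reverse.  Fuel is spent only when an
-- element is popped (an empty frame is discarded structurally).
def pvLoopB (rev : PySem.Dict String (List String)) :
    Nat → PySem.Set String × PySem.Set String → List (List String) → PySem.Set String × PySem.Set String
  | _, st, [] => st
  | fuel, st, [] :: frames => pvLoopB rev fuel st frames
  | 0, st, (_ :: _) :: _ => st
  | fuel + 1, (affected, visited), (func :: frame) :: frames =>
      if func ∈ visited then pvLoopB rev fuel (affected, visited) (frame :: frames)
      else
        let new_callers := (rev.getD func []).filter (fun c => decide (¬ c ∈ affected))
        pvLoopB rev fuel (PySem.Set.update affected new_callers, PySem.Set.add visited func)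
          (new_callers.reverse :: frame :: frames)
  termination_by fuel _ frames => (fuel, frames.length)

def find_ancestors_alt (call_graph : List (String × List String)) (functions : List String) : List String :=
  (pvLoopB (pvBuildRev (PySem.Dict.ofList call_graph).items)
    (functions.length + (PySem.Dict.ofList call_graph).items.length + 1)
    (PySem.Set.empty, PySem.Set.empty) [functions.reverse]).1

-- ===== PRECONDITION & SPEC =====
def Spec_find_ancestors (call_graph : List (String × List String)) (functions : List String) (out : List String) : Prop := out = find_ancestors_alt call_graph functions
instance (call_graph : List (String × List String)) (functions : List String) (out : List String) : Decidable (Spec_find_ancestors call_graph functions out) := by unfold Spec_find_ancestors; infer_instance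

-- ===== CLAIM (what is proved, stated in full; the proofs are below) =====
def Claim_equal_find_ancestors : Prop := ∀ (call_graph : List (String × List String)) (functions : List String), Dom_find_ancestors call_graph functions → Spec_find_ancestors call_graph functions (find_ancestors call_graph functions)

-- ===== LEMMAS AND PROOFS =====

-- the inner fold of pvBuildRev touches the bucket of func exactly once when func is in the (nodup) list
lemma pvInnerRev (a : String) : ∀ (l : List String), l.Nodup → ∀ (d : PySem.Dict String (List String)) (func : String),
    (l.foldl (fun d c => d.modify c [] (fun t => t ++ [a])) d).getD func []
      = if func ∈ l then d.getD func [] ++ [a] else d.getD func [] := by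
  intro l
  induction l with
  | nil => intro _ d func; simp
  | cons x l ih =>
    intro hnd d func
    simp only [List.foldl_cons]
    rw [ih hnd.of_cons]
    by_cases hx : func = x
    · subst hx
      have : func ∉ l := (List.nodup_cons.mp hnd).1
      simp [this, PySem.Dict.getD_modify_self]
    · rw [PySem.Dict.getD_modify_of_ne d [] _ hx]
      simp [hx]

lemma pvRevAux : ∀ (items : List (String × List String)) (d : PySem.Dict String (List String)) (func : String),
    (items.foldl (fun d p =>
        (PySem.List.dedup p.2).foldl (fun d c => d.modify c [] (fun l => l ++ [p.1])) d) d).getD func []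
      = d.getD func [] ++ (items.filter (fun p => decide (func ∈ p.2))).map Prod.fst := by
  intro items
  induction items with
  | nil => intro d func; simp
  | cons p items ih =>
    intro d func
    simp only [List.foldl_cons]
    rw [ih]
    rw [pvInnerRev p.1 (PySem.List.dedup p.2) (PySem.List.nodup_dedup p.2) d func]
    by_cases h : func ∈ p.2
    · simp [h]
    · simp [h]

-- the reverse map's bucket for func is exactly the callers whose callees contain func, in order
lemma pvRevGetD (items : List (String × List String)) (func : String) :
    (pvBuildRev items).getD func [] = (items.filter (fun p => decide (func ∈ p.2))).map Prod.fst := by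
  unfold pvBuildRev
  rw [pvRevAux]
  simp

-- folding a guarded body over a list equals folding over the filtered-and-projected list
lemma pvFoldFilterMap {σ : Type} (P : String × List String → Bool) (g : σ → String → σ) :
    ∀ (l : List (String × List String)) (s : σ),
      l.foldl (fun s p => if P p then g s p.1 else s) s = ((l.filter P).map Prod.fst).foldl g s := by
  intro l
  induction l with
  | nil => intro s; rfl
  | cons p l ih =>
    intro s
    by_cases h : P p = true
    · simp [h, ih]
    · simp [h, ih]

-- one-by-one guarded pushes over a duplicate-free list = batch filter + append
lemma pvFoldBatch : ∀ (l : List String), l.Nodup → ∀ (aff : PySem.Set String) (stack : List String),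
    l.foldl (fun st c => if ¬ c ∈ st.1 then (PySem.Set.add st.1 c, c :: st.2) else st) (aff, stack)
      = (aff ++ l.filter (fun c => decide (¬ c ∈ aff)),
         (l.filter (fun c => decide (¬ c ∈ aff))).reverse ++ stack) := by
  intro l
  induction l with
  | nil => intro _ aff stack; simp
  | cons c l ih =>
    intro hnd aff stack
    have hc_not_l : c ∉ l := (List.nodup_cons.mp hnd).1
    by_cases hc : c ∈ aff
    · rw [List.foldl_cons, if_neg (by simp [hc]), List.filter_cons_of_neg (by simp [hc])]
      exact ih hnd.of_cons aff stack
    · rw [List.foldl_cons, if_pos (by simp [hc]), List.filter_cons_of_pos (by simp [hc])]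
      have hadd : ((aff, stack).1.add c, c :: (aff, stack).2) = ((aff ++ [c] : PySem.Set String), c :: stack) := by
        rw [show (aff, stack).1.add c = aff ++ [c] from PySem.Set.add_of_not_mem hc]
      rw [hadd, ih hnd.of_cons (aff ++ [c]) (c :: stack)]
      have hfe : l.filter (fun x => decide (¬ x ∈ aff ++ [c])) = l.filter (fun x => decide (¬ x ∈ aff)) := by
        apply List.filter_congr
        intro x hx
        have : x ≠ c := fun h => hc_not_l (h ▸ hx)
        simp [List.mem_append, this]
      rw [hfe]
      simp

-- A's scan over the items equals one lookup in the reverse index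
lemma pvStepEq (items : List (String × List String)) (hk : (items.map Prod.fst).Nodup)
    (func : String) (aff : PySem.Set String) (stack : List String) :
    pvStepA items func (aff, stack)
      = (PySem.Set.update aff (((pvBuildRev items).getD func []).filter (fun c => decide (¬ c ∈ aff))),
         (((pvBuildRev items).getD func []).filter (fun c => decide (¬ c ∈ aff))).reverse ++ stack) := by
  unfold pvStepA
  rw [pvRevGetD]
  have hbucket : ((items.filter (fun p => decide (func ∈ p.2))).map Prod.fst).Nodup :=
    hk.sublist (List.Sublist.map Prod.fst List.filter_sublist)
  have hA : items.foldl (fun st p =>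
      if func ∈ p.2 ∧ ¬ p.1 ∈ st.1 then (PySem.Set.add st.1 p.1, p.1 :: st.2) else st) (aff, stack)
      = ((items.filter (fun p => decide (func ∈ p.2))).map Prod.fst).foldl
          (fun st c => if ¬ c ∈ st.1 then (PySem.Set.add st.1 c, c :: st.2) else st) (aff, stack) := by
    rw [← pvFoldFilterMap (fun p => decide (func ∈ p.2))
      (fun st c => if ¬ c ∈ st.1 then (PySem.Set.add st.1 c, c :: st.2) else st) items (aff, stack)]
    congr 1
    funext s p
    by_cases h1 : func ∈ p.2 <;> by_cases h2 : p.1 ∈ s.1 <;> simp [h1, h2]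
  rw [hA, pvFoldBatch _ hbucket aff stack]
  have hdis : ∀ x ∈ ((items.filter (fun p => decide (func ∈ p.2))).map Prod.fst).filter
      (fun c => decide (¬ c ∈ aff)), x ∉ aff := by
    intro x hx
    simpa using (List.of_mem_filter hx)
  rw [PySem.Set.update_eq_append_of_disjoint aff _ (hbucket.filter _) hdis]

-- bisimulation: B's frame stack flattens to A's worklist
lemma pvLoopEq (items : List (String × List String)) (hk : (items.map Prod.fst).Nodup) :
    ∀ (fuel : Nat) (frames : List (List String)) (st : PySem.Set String × PySem.Set String),
      pvLoopB (pvBuildRev items) fuel st frames = pvLoopA items fuel st frames.flatten := by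
  intro fuel
  induction fuel with
  | zero =>
    intro frames
    induction frames with
    | nil => intro st; simp [pvLoopB, pvLoopA]
    | cons fr fs ihf =>
      intro st
      cases fr with
      | nil => simp only [pvLoopB, List.flatten_cons, List.nil_append]; exact ihf st
      | cons f fr => simp [pvLoopB, pvLoopA]
  | succ fuel ih =>
    intro frames
    induction frames with
    | nil => intro st; simp [pvLoopB, pvLoopA]
    | cons fr fs ihf =>
      intro st
      cases fr with
      | nil => simp only [pvLoopB, List.flatten_cons, List.nil_append]; exact ihf st
      | cons f fr =>
        obtain ⟨aff, vis⟩ := st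
        by_cases h : f ∈ vis
        · simp only [pvLoopB, pvLoopA, h, if_true, List.flatten_cons, List.cons_append]
          have := ih (fr :: fs) (aff, vis)
          simpa using this
        · simp only [pvLoopB, pvLoopA, h, if_false, List.flatten_cons, List.cons_append]
          rw [pvStepEq items hk f aff (fr ++ fs.flatten)]
          have := ih ((((pvBuildRev items).getD f []).filter (fun c => decide (¬ c ∈ aff))).reverse :: fr :: fs)
            (PySem.Set.update aff (((pvBuildRev items).getD f []).filter (fun c => decide (¬ c ∈ aff))),
             PySem.Set.add vis f)
          simpa using this

-- ===== VERDICT (by name: the statement is the Claim_ definition above) =====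
theorem find_ancestors_spec : Claim_equal_find_ancestors := by
  intro call_graph functions _
  unfold Spec_find_ancestors find_ancestors find_ancestors_alt
  rw [pvLoopEq _ (PySem.Dict.nodup_keys_ofList call_graph)]
  simp only [List.flatten_cons, List.flatten_nil, List.append_nil]
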